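-- pv_equiv track=rewrite | github.com/gcadoret/langgraph-jira-github-agent | agent_harness/repo_context.py | _tokenize
-- ===== SOURCE A (Python) =====
-- STOP_WORDS = {
--     "the",
--     "and",
--     "for",
--     "with",
--     "from",
--     "that",
--     "this",
--     "dans",
--     "pour",
--     "avec",
--     "ticket",
--     "issue",
--     "plan",
--     "jira",
--     "sur",
--     "des",
--     "les",
--     "une",
--     "est",
-- }
--
-- TOKEN_SYNONYMS = {
--     "son": {"audio", "sound", "music"},
--     "sons": {"audio", "sound", "music"},
--     "audio": {"sound", "music"},
--     "sound": {"audio", "music"},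
--     "musique": {"audio", "music", "sound"},
--     "selection": {"select", "picker", "choose"},
--     "selectionner": {"select", "picker", "choose"},
--     "choisir": {"select", "picker", "choose"},
--     "galerie": {"gallery"},
--     "miniature": {"thumbnail", "thumb"},
--     "boucle": {"loop"},
--     "video": {"player", "media"},
-- }
--
-- def _tokenize(text: str) -> set[str]:
--     normalized = []
--     for char in text.lower():
--         normalized.append(char if char.isalnum() else " ")
--     base_tokens = {token for token in "".join(normalized).split() if len(token) >= 3 and token not in STOP_WORDS}
--     expanded_tokens = set(base_tokens)
--     for token in base_tokens:
--         expanded_tokens.update(TOKEN_SYNONYMS.get(token, set()))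
--     tokens = {token for token in expanded_tokens if len(token) >= 3 and token not in STOP_WORDS}
--     return tokens
-- ===== SOURCE B (Python) =====
-- STOP_WORDS = {
--     "the", "and", "for", "with", "from", "that", "this", "dans", "pour",
--     "avec", "ticket", "issue", "plan", "jira", "sur", "des", "les", "une", "est",
-- }
--
-- TOKEN_SYNONYMS = {
--     "son": {"audio", "sound", "music"},
--     "sons": {"audio", "sound", "music"},
--     "audio": {"sound", "music"},
--     "sound": {"audio", "music"},
--     "musique": {"audio", "music", "sound"},
--     "selection": {"select", "picker", "choose"},
--     "selectionner": {"select", "picker", "choose"},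
--     "choisir": {"select", "picker", "choose"},
--     "galerie": {"gallery"},
--     "miniature": {"thumbnail", "thumb"},
--     "boucle": {"loop"},
--     "video": {"player", "media"},
-- }
--
--
-- def _keep(word: str) -> bool:
--     return len(word) >= 3 and word not in STOP_WORDS
--
--
-- def _tokenize(text: str) -> set[str]:
--     # single-pass state machine over the lowered text: no normalized copy, no split()
--     tokens: set[str] = set()
--     buf: list[str] = []
--     for ch in text.lower():
--         if ch.isalnum():
--             buf.append(ch)
--         else:
--             word = "".join(buf)
--             if _keep(word):
--                 tokens.add(word)
--             buf = []
--     word = "".join(buf)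
--     if _keep(word):
--         tokens.add(word)
--     expanded = tokens | {syn for t in tokens for syn in TOKEN_SYNONYMS.get(t, set())}
--     return {t for t in expanded if _keep(t)}
-- ===== Notes on version B (the rewrite author's own statement) =====
-- stated objective: alternative
-- what changed: Replaces build-normalized-string-then-split() tokenization with a single-pass character state machine that flushes a running word buffer (filtering at flush time), and builds the synonym expansion with a set comprehension/union instead of an in-place update loop.
import Mathlib
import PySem

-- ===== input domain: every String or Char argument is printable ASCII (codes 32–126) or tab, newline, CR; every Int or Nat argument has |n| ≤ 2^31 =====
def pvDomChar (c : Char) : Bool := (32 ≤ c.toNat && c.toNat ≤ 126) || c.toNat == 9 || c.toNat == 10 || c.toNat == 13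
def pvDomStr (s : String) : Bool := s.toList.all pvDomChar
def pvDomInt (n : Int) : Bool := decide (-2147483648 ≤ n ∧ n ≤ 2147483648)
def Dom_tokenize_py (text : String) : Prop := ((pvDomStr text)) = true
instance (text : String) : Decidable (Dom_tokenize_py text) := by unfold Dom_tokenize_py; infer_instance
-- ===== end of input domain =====

-- B replaces normalize-then-split() tokenization by a single-pass buffer state machine
-- (alternative decomposition, same asymptotic cost); the return value is a set, proved equal as lists here.

-- shared module-level constants of the Python module
def STOP_WORDS : PySem.Set String := PySem.Set.ofList
  ["the", "and", "for", "with", "from", "that", "this", "dans", "pour",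
   "avec", "ticket", "issue", "plan", "jira", "sur", "des", "les", "une", "est"]

def TOKEN_SYNONYMS : PySem.Dict String (PySem.Set String) := PySem.Dict.ofList
  [ ("son", PySem.Set.ofList ["audio", "sound", "music"]),
    ("sons", PySem.Set.ofList ["audio", "sound", "music"]),
    ("audio", PySem.Set.ofList ["sound", "music"]),
    ("sound", PySem.Set.ofList ["audio", "music"]),
    ("musique", PySem.Set.ofList ["audio", "music", "sound"]),
    ("selection", PySem.Set.ofList ["select", "picker", "choose"]),
    ("selectionner", PySem.Set.ofList ["select", "picker", "choose"]),
    ("choisir", PySem.Set.ofList ["select", "picker", "choose"]),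
    ("galerie", PySem.Set.ofList ["gallery"]),
    ("miniature", PySem.Set.ofList ["thumbnail", "thumb"]),
    ("boucle", PySem.Set.ofList ["loop"]),
    ("video", PySem.Set.ofList ["player", "media"]) ]

-- ===== PORT A =====
-- normalized is kept as a List Char ("".join of the appended 1-char pieces is exact on chars)
def tokenize_py (text : String) : List String :=
  let normalized : List Char :=
    (PySem.Str.lower text).toList.foldl
      (fun acc char => acc ++ [if PySem.Chars.isalnum char then char else ' ']) []
  let base_tokens : PySem.Set String :=
    PySem.Set.ofList (((PySem.Chars.split₀ normalized).map String.ofList).filter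
      (fun token => decide ((3 : Int) ≤ PySem.Str.len token) && !(PySem.Set.contains STOP_WORDS token)))
  let expanded_tokens : PySem.Set String :=
    base_tokens.foldl
      (fun e token => PySem.Set.update e (PySem.Dict.getD TOKEN_SYNONYMS token PySem.Set.empty))
      (PySem.Set.ofList base_tokens)
  PySem.Set.ofList (expanded_tokens.filter
    (fun token => decide ((3 : Int) ≤ PySem.Str.len token) && !(PySem.Set.contains STOP_WORDS token)))

-- ===== PORT B =====
def pvKeep (word : String) : Bool :=
  decide ((3 : Int) ≤ PySem.Str.len word) && !(PySem.Set.contains STOP_WORDS word)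

def pvFlush (tokens : PySem.Set String) (buf : List Char) : PySem.Set String :=
  let word := String.ofList buf
  if pvKeep word then PySem.Set.add tokens word else tokens

def pvStep (st : PySem.Set String × List Char) (ch : Char) : PySem.Set String × List Char :=
  if PySem.Chars.isalnum ch then (st.1, st.2 ++ [ch]) else (pvFlush st.1 st.2, [])

def tokenize_py_alt (text : String) : List String :=
  let st := (PySem.Str.lower text).toList.foldl pvStep (PySem.Set.empty, [])
  let tokens := pvFlush st.1 st.2
  let expanded := PySem.Set.union tokens
    (PySem.Set.ofList (tokens.flatMap (fun t => (PySem.Dict.getD TOKEN_SYNONYMS t PySem.Set.empty : List String))))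
  PySem.Set.ofList (expanded.filter pvKeep)

-- ===== PRECONDITION & SPEC =====
def Spec_tokenize_py (text : String) (out : List String) : Prop := out = tokenize_py_alt text
instance (text : String) (out : List String) : Decidable (Spec_tokenize_py text out) := by unfold Spec_tokenize_py; infer_instance

-- ===== CLAIM (what is proved, stated in full; the proofs are below) =====
def Claim_equal_tokenize_py : Prop := ∀ (text : String), Dom_tokenize_py text → Spec_tokenize_py text (tokenize_py text)

-- ===== LEMMAS AND PROOFS =====

def pvNorm (c : Char) : Char := if PySem.Chars.isalnum c then c else ' '

-- the word sequence of B's state machine, as a recursive function on (input, current buffer)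
def pvWords : List Char → List Char → List (List Char)
  | [], b => if b.isEmpty then [] else [b]
  | c :: l, b =>
    if PySem.Chars.isalnum c then pvWords l (b ++ [c])
    else if b.isEmpty then pvWords l [] else b :: pvWords l []

theorem pv_alnum_not_space (c : Char) (h : PySem.Chars.isalnum c = true) :
    PySem.Chars.isspace c = false := by
  simp only [PySem.Chars.isalnum, PySem.Chars.isalpha, PySem.Chars.isupper,
    PySem.Chars.islower, PySem.Chars.isdigit, Bool.or_eq_true, Bool.and_eq_true,
    decide_eq_true_eq, Char.le_def] at h
  unfold PySem.Chars.isspace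
  simp only [Bool.or_eq_false_iff, Bool.and_eq_false_iff, decide_eq_false_iff_not, Char.toNat]
  have hA : ('A').val.toNat = 65 := rfl
  have hZ : ('Z').val.toNat = 90 := rfl
  have ha : ('a').val.toNat = 97 := rfl
  have hz : ('z').val.toNat = 122 := rfl
  have h0 : ('0').val.toNat = 48 := rfl
  have h9 : ('9').val.toNat = 57 := rfl
  rcases h with ((⟨h1, h2⟩ | ⟨h1, h2⟩) | ⟨h1, h2⟩) <;>
    · rw [UInt32.le_iff_toNat_le] at h1 h2
      omega

theorem pv_norm_foldl (l : List Char) (acc : List Char) :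
    l.foldl (fun a c => a ++ [if PySem.Chars.isalnum c then c else ' ']) acc
      = acc ++ l.map pvNorm := by
  induction l generalizing acc with
  | nil => simp
  | cons c l ih => simp [ih, pvNorm]

theorem pv_go_eq (l : List Char) (cur : List Char) (acc : List (List Char)) :
    PySem.Chars.split₀.go (l.map pvNorm) cur acc = acc.reverse ++ pvWords l cur.reverse := by
  induction l generalizing cur acc with
  | nil =>
    by_cases hc : cur = []
    · simp [hc, PySem.Chars.split₀.go, pvWords]
    · simp [PySem.Chars.split₀.go, pvWords, List.isEmpty_iff, hc]
  | cons c l ih =>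
    by_cases ha : PySem.Chars.isalnum c = true
    · have hn : pvNorm c = c := by simp [pvNorm, ha]
      have hs := pv_alnum_not_space c ha
      simp only [List.map_cons, PySem.Chars.split₀.go, hn, hs, Bool.false_eq_true, if_false]
      rw [ih, pvWords]
      simp [ha]
    · have hn : pvNorm c = ' ' := by simp [pvNorm, ha]
      have hs : PySem.Chars.isspace ' ' = true := by decide
      simp only [List.map_cons, PySem.Chars.split₀.go, hn, hs, if_true]
      by_cases hc : cur = []
      · subst hc
        simp only [List.isEmpty_nil, if_true]
        rw [ih, pvWords]
        simp [ha]
      · simp only [List.isEmpty_iff, hc, if_false]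
        rw [ih, pvWords]
        simp [ha, List.isEmpty_iff, hc]

theorem pv_split_eq (l : List Char) :
    PySem.Chars.split₀ (l.map pvNorm) = pvWords l [] := by
  have := pv_go_eq l [] []
  simpa [PySem.Chars.split₀] using this

theorem pv_machine_eq (l : List Char) (s : PySem.Set String) (b : List Char) :
    pvFlush (l.foldl pvStep (s, b)).1 (l.foldl pvStep (s, b)).2
      = List.foldl PySem.Set.add s (((pvWords l b).map String.ofList).filter pvKeep) := by
  induction l generalizing s b with
  | nil =>
    by_cases hb : b = []
    · subst hb
      have h0 : pvKeep (String.ofList ([] : List Char)) = false := by decide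
      simp [pvWords, pvFlush, h0]
    · simp only [List.foldl_nil, pvWords, List.isEmpty_iff, hb, if_false]
      cases hk : pvKeep (String.ofList b) <;> simp [pvFlush, hk]
  | cons c l ih =>
    by_cases ha : PySem.Chars.isalnum c = true
    · simp only [List.foldl_cons, pvStep, ha, if_true]
      rw [ih, pvWords]
      simp [ha]
    · simp only [List.foldl_cons, pvStep, ha, Bool.false_eq_true, if_false]
      rw [ih, pvWords]
      simp only [ha, Bool.false_eq_true, if_false]
      by_cases hb : b = []
      · subst hb
        have : pvKeep (String.ofList ([] : List Char)) = false := by decide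
        simp [pvFlush, this]
      · simp only [List.isEmpty_iff, hb, if_false, List.map_cons]
        cases hk : pvKeep (String.ofList b) <;> simp [pvFlush, hk, List.filter_cons]

def pvSyn (t : String) : List String := PySem.Dict.getD TOKEN_SYNONYMS t PySem.Set.empty

theorem pv_update_loop (L : List String) (e : PySem.Set String) :
    L.foldl (fun e t => PySem.Set.update e (pvSyn t)) e
      = PySem.Set.update e (L.flatMap pvSyn) := by
  induction L generalizing e with
  | nil => simp [PySem.Set.update]
  | cons t L ih =>
    have h : (t :: L).foldl (fun e t => PySem.Set.update e (pvSyn t)) e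
        = L.foldl (fun e t => PySem.Set.update e (pvSyn t)) (PySem.Set.update e (pvSyn t)) := rfl
    rw [h, ih, List.flatMap_cons]
    simp [PySem.Set.update, List.foldl_append]

theorem pv_update_ofList (s : PySem.Set String) (xs : List String) :
    PySem.Set.update s (PySem.Set.ofList xs) = PySem.Set.update s xs := by
  rw [PySem.Set.update_eq_append_filter, PySem.Set.update_eq_append_filter,
    PySem.Set.ofList_ofList]

theorem tokenize_eq (text : String) : tokenize_py text = tokenize_py_alt text := by
  have hk : (fun token => decide ((3 : Int) ≤ PySem.Str.len token)
      && !(PySem.Set.contains STOP_WORDS token)) = pvKeep := rfl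
  simp only [tokenize_py, tokenize_py_alt, hk]
  rw [pv_norm_foldl, List.nil_append, pv_split_eq, pv_machine_eq]
  have hof : List.foldl PySem.Set.add PySem.Set.empty
      (((pvWords (PySem.Str.lower text).toList []).map String.ofList).filter pvKeep)
      = PySem.Set.ofList (((pvWords (PySem.Str.lower text).toList []).map String.ofList).filter pvKeep) := rfl
  rw [hof]
  set T : PySem.Set String :=
    PySem.Set.ofList (((pvWords (PySem.Str.lower text).toList []).map String.ofList).filter pvKeep)
    with hT
  have hTnodup : T.Nodup := by rw [hT]; exact PySem.Set.nodup_ofList _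
  have h1 : PySem.Set.ofList T = T := PySem.Set.ofList_eq_self_of_nodup T hTnodup
  rw [h1]
  have h2 : T.foldl (fun e token =>
        PySem.Set.update e (PySem.Dict.getD TOKEN_SYNONYMS token PySem.Set.empty)) T
      = PySem.Set.update T (T.flatMap pvSyn) := pv_update_loop T T
  rw [h2]
  have h3 : PySem.Set.union T
      (PySem.Set.ofList (T.flatMap fun t => (PySem.Dict.getD TOKEN_SYNONYMS t PySem.Set.empty : List String)))
      = PySem.Set.update T (T.flatMap pvSyn) := by
    rw [PySem.Set.union]
    exact pv_update_ofList T _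
  rw [h3]

-- ===== VERDICT (by name: the statement is the Claim_ definition above) =====
theorem tokenize_py_spec : Claim_equal_tokenize_py := by
  intro text _
  unfold Spec_tokenize_py
  exact tokenize_eq text
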